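-- pv_equiv track=rewrite | github.com/dsrgva/systemniyanaliz | task2/task.py | r5
-- ===== SOURCE A (Python) =====
-- def r5(gr):
--   f, g = gr, gr
--   mas = []
--   for i in range(len(f)):
--     for j in range(len(g)):
--       if i != j and f[i][1] not in mas and f[i][0] == g[j][0]:
--         mas.append(str(f[i][1]))
--   return mas
-- ===== SOURCE B (Python) =====
-- def r5(gr):
--     # One pass to count first-column values, one pass to emit str(second) once
--     # per OTHER row sharing the first-column value (A's "not in mas" test
--     # compares an int against strings, so it never suppresses anything).
--     cnt = {}
--     for k, _ in gr:
--         cnt[k] = cnt.get(k, 0) + 1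
--     out = []
--     for k, v in gr:
--         out.extend([str(v)] * (cnt[k] - 1))
--     return out
-- ===== Notes on version B (the rewrite author's own statement) =====
-- stated objective: faster
-- what changed: Replaces the quadratic nested index scan (whose int-in-list-of-str dedup test can never fire) by a dict counting first-column values once, then a single pass emitting str(v) repeated count(k)-1 times per row.
import Mathlib
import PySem

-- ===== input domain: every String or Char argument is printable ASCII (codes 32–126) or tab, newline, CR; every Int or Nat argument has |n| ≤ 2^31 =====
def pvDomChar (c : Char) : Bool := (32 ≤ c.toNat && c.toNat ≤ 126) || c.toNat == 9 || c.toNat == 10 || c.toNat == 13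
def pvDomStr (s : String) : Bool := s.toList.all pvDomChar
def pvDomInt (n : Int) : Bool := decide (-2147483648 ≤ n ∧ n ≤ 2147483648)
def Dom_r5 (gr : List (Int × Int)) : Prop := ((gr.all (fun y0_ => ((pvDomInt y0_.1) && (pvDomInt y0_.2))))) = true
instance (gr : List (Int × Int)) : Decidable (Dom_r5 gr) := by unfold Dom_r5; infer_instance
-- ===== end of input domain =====

-- B replaces A's quadratic nested index scan by a dict counting first-column
-- values once and a single emitting pass (A's `f[i][1] not in mas` compares an
-- int with strings, so it never suppresses an append).

-- ===== PORT A =====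
-- Python's `x in mas` where x is an int and mas holds only strings: `==`
-- between an int and a str is always False, so the per-element test is
-- `false` (exact on all inputs).
def pyIntMemStrList (x : Int) (l : List String) : Bool := l.any (fun _ => false)

def r5 (gr : List (Int × Int)) : List String :=
  let f := gr
  let g := gr
  (PySem.List.pyRange 0 (f.length : Int) 1).foldl (fun mas i =>
    (PySem.List.pyRange 0 (g.length : Int) 1).foldl (fun mas j =>
      if i ≠ j ∧ pyIntMemStrList (PySem.List.pyGetD f i (0, 0)).2 mas = false
            ∧ (PySem.List.pyGetD f i (0, 0)).1 = (PySem.List.pyGetD g j (0, 0)).1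
      then mas ++ [PySem.Int.toStr (PySem.List.pyGetD f i (0, 0)).2]
      else mas) mas) []

-- ===== PORT B =====
def r5_alt (gr : List (Int × Int)) : List String :=
  let cnt := gr.foldl (fun d kv => d.insert kv.1 (d.getD kv.1 0 + 1))
    (PySem.Dict.empty : PySem.Dict Int Int)
  gr.foldl (fun out kv =>
    out ++ List.replicate (cnt.getD kv.1 0 - 1).toNat (PySem.Int.toStr kv.2)) []

-- ===== PRECONDITION & SPEC =====
def Spec_r5 (gr : List (Int × Int)) (out : List String) : Prop := out = r5_alt gr
instance (gr : List (Int × Int)) (out : List String) : Decidable (Spec_r5 gr out) := by unfold Spec_r5; infer_instance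

-- ===== CLAIM (what is proved, stated in full; the proofs are below) =====
def Claim_equal_r5 : Prop := ∀ (gr : List (Int × Int)), Dom_r5 gr → Spec_r5 gr (r5 gr)

-- ===== LEMMAS AND PROOFS =====

theorem pyIntMemStrList_false (x : Int) (l : List String) : pyIntMemStrList x l = false := by
  simp [pyIntMemStrList]

theorem map_getD_range {α : Type} (xs : List α) (d : α) :
    (List.range xs.length).map (fun k => xs.getD k d) = xs := by
  apply List.ext_getElem (by simp)
  intro i h1 h2
  simp [List.getD_eq_getElem?_getD, h2]

theorem countP_range_getD {α : Type} (xs : List α) (d : α) (q : α → Bool) :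
    (List.range xs.length).countP (fun j => q (xs.getD j d)) = xs.countP q := by
  conv_rhs => rw [← map_getD_range xs d]
  rw [List.countP_map]
  rfl

theorem flatMap_range_getD {α β : Type} (xs : List α) (d : α) (F : α → List β) :
    (List.range xs.length).flatMap (fun k => F (xs.getD k d)) = xs.flatMap F := by
  conv_rhs => rw [← map_getD_range xs d]
  rw [List.flatMap_map]

-- counting the other positions: drop exactly one hit when k itself is a hit
theorem countP_ne_of_nodup {α : Type} [DecidableEq α] (l : List α) (k : α) (p : α → Bool)
    (hnd : l.Nodup) (hk : k ∈ l) (hp : p k = true) :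
    l.countP (fun j => decide (k ≠ j) && p j) = l.countP p - 1 := by
  induction l with
  | nil => cases hk
  | cons a t ih =>
    rw [List.nodup_cons] at hnd
    rw [List.countP_cons, List.countP_cons]
    by_cases hak : a = k
    · subst hak
      have h1 : t.countP (fun j => decide (a ≠ j) && p j) = t.countP p := by
        apply List.countP_congr
        intro x hx
        have hax : a ≠ x := fun h => hnd.1 (h ▸ hx)
        simp [hax]
      rw [h1]
      simp [hp]
    · have hkt : k ∈ t := by
        rcases List.mem_cons.mp hk with h | h
        · exact absurd h.symm hak
        · exact h
      have hpos : 0 < t.countP p := List.countP_pos_iff.mpr ⟨k, hkt, hp⟩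
      rw [ih hnd.2 hkt]
      have hka : decide (k ≠ a) = true := by simp [Ne.symm hak]
      rw [hka, Bool.true_and]
      split_ifs <;> omega

theorem r5_eq (gr : List (Int × Int)) :
    r5 gr = gr.flatMap (fun kv =>
      List.replicate (gr.countP (fun q => decide (kv.1 = q.1)) - 1)
        (PySem.Int.toStr kv.2)) := by
  unfold r5
  simp only [pyIntMemStrList_false]
  have h1 : ∀ (mas : List String) (i : Int),
      (PySem.List.pyRange 0 (gr.length : Int) 1).foldl (fun mas j =>
        if i ≠ j ∧ True
              ∧ (PySem.List.pyGetD gr i (0, 0)).1 = (PySem.List.pyGetD gr j (0, 0)).1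
        then mas ++ [PySem.Int.toStr (PySem.List.pyGetD gr i (0, 0)).2]
        else mas) mas
      = mas ++ List.replicate
          (((PySem.List.pyRange 0 (gr.length : Int) 1).filter (fun j =>
            decide (i ≠ j ∧ True
              ∧ (PySem.List.pyGetD gr i (0, 0)).1 = (PySem.List.pyGetD gr j (0, 0)).1))).length)
          (PySem.Int.toStr (PySem.List.pyGetD gr i (0, 0)).2) := by
    intro mas i
    rw [PySem.List.foldl_append_ite
      (fun j => i ≠ j ∧ True
        ∧ (PySem.List.pyGetD gr i (0, 0)).1 = (PySem.List.pyGetD gr j (0, 0)).1)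
      (fun _ => PySem.Int.toStr (PySem.List.pyGetD gr i (0, 0)).2), List.map_const']
  rw [PySem.List.foldl_congr_mem _ _ _ _ (fun mas => fun i _ => h1 mas i)]
  rw [PySem.List.foldl_append_eq_flatMap, List.nil_append]
  simp only [PySem.List.pyRange_zero_nat, List.flatMap_map, ← List.countP_eq_length_filter,
    List.countP_map, Function.comp_def, PySem.List.pyGetD_natCast]
  rw [← flatMap_range_getD gr (0, 0) (fun kv =>
      List.replicate (gr.countP (fun q => decide (kv.1 = q.1)) - 1) (PySem.Int.toStr kv.2))]
  rw [List.flatMap_def, List.flatMap_def]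
  congr 1
  apply List.map_congr_left
  intro k hk
  have hkn : k < gr.length := List.mem_range.mp hk
  congr 1
  have hd : ∀ j : Nat, (decide (¬(k : Int) = (j : Int) ∧ True
        ∧ (gr.getD k (0, 0)).1 = (gr.getD j (0, 0)).1))
      = (decide (k ≠ j) && (fun j => decide ((gr.getD k (0, 0)).1 = (gr.getD j (0, 0)).1)) j) := by
    intro j
    simp [Bool.decide_and, ne_eq]
  rw [List.countP_congr (fun j _ => by rw [hd j])]
  rw [countP_ne_of_nodup (List.range gr.length) k _ List.nodup_range
    (List.mem_range.mpr hkn) (by simp)]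
  congr 1
  exact countP_range_getD gr (0, 0) (fun p => decide ((gr.getD k (0, 0)).1 = p.1))

theorem r5_alt_eq (gr : List (Int × Int)) :
    r5_alt gr = gr.flatMap (fun kv =>
      List.replicate (gr.countP (fun q => decide (kv.1 = q.1)) - 1)
        (PySem.Int.toStr kv.2)) := by
  unfold r5_alt
  have hfold : gr.foldl (fun d kv => d.insert kv.1 (d.getD kv.1 0 + 1))
      (PySem.Dict.empty : PySem.Dict Int Int)
      = (gr.map (fun kv => kv.1)).foldl (fun d x => d.insert x (d.getD x 0 + 1))
          (PySem.Dict.empty : PySem.Dict Int Int) :=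
    (List.foldl_map (f := fun kv : Int × Int => kv.1)
      (g := fun d x => d.insert x (d.getD x 0 + 1)) (l := gr)
      (init := (PySem.Dict.empty : PySem.Dict Int Int))).symm
  have hcnt : ∀ c : Int,
      (gr.foldl (fun d kv => d.insert kv.1 (d.getD kv.1 0 + 1))
        (PySem.Dict.empty : PySem.Dict Int Int)).getD c 0
      = (gr.countP (fun q => decide (c = q.1)) : Int) := by
    intro c
    rw [hfold, PySem.Dict.getD_foldl_insert_add_one, PySem.Dict.getD_empty,
      List.count_eq_countP, List.countP_map]
    have hq : List.countP ((fun x => x == c) ∘ fun kv : Int × Int => kv.1) gr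
        = List.countP (fun q : Int × Int => decide (c = q.1)) gr :=
      List.countP_congr (fun x _ => by simpa [Function.comp] using eq_comm)
    rw [hq]
    simp
  rw [PySem.List.foldl_append_eq_flatMap, List.nil_append,
    List.flatMap_def, List.flatMap_def]
  congr 1
  apply List.map_congr_left
  intro kv _
  rw [hcnt kv.1]
  congr 1
  omega

-- ===== VERDICT (by name: the statement is the Claim_ definition above) =====
theorem r5_spec : Claim_equal_r5 := by
  intro gr _
  unfold Spec_r5
  rw [r5_eq, r5_alt_eq]
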